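-- pv_equiv track=rewrite | github.com/OhMaley/AoC | 2024/Day04/solution.py | count_cross_occurences
-- ===== SOURCE A (Python) =====
-- from typing import List
--
-- def count_cross_occurences(word: str, table: List[str]) -> int:
--     word_length = len(word)
--     if word_length % 2 == 0:
--         return 0
--
--     count: int = 0
--     height: int = len(table)
--     width: int = len(table[0])
--     middle_index = word_length // 2
--     middle_char = word[middle_index]
--
--     for i in range(middle_index, height - middle_index):
--         for j in range(middle_index, width - middle_index):
--             if middle_char == table[i][j]:
--                 row_start = max(0, i - middle_index)
--                 row_end = min(height, i + middle_index + 1)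
--                 col_start = max(0, j - middle_index)
--                 col_end = min(width, j + middle_index + 1)
--                 sub_table = [
--                     "".join(row[col_start:col_end]) for row in table[row_start:row_end]
--                 ]
--                 count += 1 if is_cross_here(sub_table, word) else 0
--
--     return count
--
-- def is_cross_here(table: List[str], word: str) -> bool:
--     size: int = len(word)
--     positive_diagonal: str = "".join(table[size - i - 1][i] for i in range(size))
--     negative_diagonal: str = "".join(table[i][i] for i in range(size))
--     return (word in positive_diagonal or word[::-1] in positive_diagonal) and (
--         word in negative_diagonal or word[::-1] in negative_diagonal
--     )
-- ===== SOURCE B (Python) =====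
-- from typing import List
--
-- def count_cross_occurences(word: str, table: List[str]) -> int:
--     # Scan whole diagonals as strings and slide a window, instead of testing
--     # each candidate centre cell: pass 1 records the centres of all down-right
--     # diagonal matches in a set, pass 2 counts anti-diagonal matches whose
--     # centre was recorded.
--     L = len(word)
--     if L % 2 == 0:
--         return 0
--     H = len(table)
--     W = len(table[0])
--     m = L // 2
--     targets = (word, word[::-1])
--     centers = set()
--     for c in range(-(W - 1), H):          # down-right diagonal: i - j == c
--         lo = max(0, c)
--         hi = min(H, W + c)
--         s = "".join(table[i][i - c] for i in range(lo, hi))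
--         for p in range(hi - lo - L + 1):
--             if s[p:p + L] in targets:
--                 centers.add((lo + p + m, lo + p + m - c))
--     count = 0
--     for c in range(0, H + W - 1):         # anti-diagonal: i + j == c
--         lo = max(0, c - W + 1)
--         hi = min(H, c + 1)
--         s = "".join(table[i][c - i] for i in range(lo, hi))
--         for p in range(hi - lo - L + 1):
--             if s[p:p + L] in targets and (lo + p + m, c - lo - p - m) in centers:
--                 count += 1
--     return count
-- ===== Notes on version B (the rewrite author's own statement) =====
-- stated objective: alternative
-- what changed: B scans each whole diagonal of the grid once as a string and slides a length-L window over it (pass 1 records centres of down-right diagonal matches in a set, pass 2 counts anti-diagonal matches whose centre was recorded), instead of A's per-centre test that builds an LxL sub-table and substring-searches its two diagonals for every candidate cell.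
-- outside the precondition, e.g. on count_cross_occurences('XYX', ['ABC', 'BBB', 'C']): A returns 0, B raises IndexError
import Mathlib
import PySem

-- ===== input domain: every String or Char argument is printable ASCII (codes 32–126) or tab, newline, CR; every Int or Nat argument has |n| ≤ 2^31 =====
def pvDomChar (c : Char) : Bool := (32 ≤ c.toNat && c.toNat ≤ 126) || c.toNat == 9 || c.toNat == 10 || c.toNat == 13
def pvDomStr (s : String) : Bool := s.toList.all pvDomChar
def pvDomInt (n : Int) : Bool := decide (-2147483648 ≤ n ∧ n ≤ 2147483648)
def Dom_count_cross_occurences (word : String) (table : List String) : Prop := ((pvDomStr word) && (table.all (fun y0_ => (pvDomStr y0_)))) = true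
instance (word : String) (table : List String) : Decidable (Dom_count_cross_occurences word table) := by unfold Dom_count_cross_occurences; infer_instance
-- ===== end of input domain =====

-- B scans each whole diagonal of the grid once as a string, sliding a length-L window:
-- pass 1 collects the centres of all down-right diagonal matches in a set, pass 2 counts
-- anti-diagonal matches whose centre was collected — instead of A's per-centre test that
-- builds an L×L sub-table for every candidate cell (objective: alternative algorithm).

-- ===== PORT A =====
-- Strings are handled as their List Char (PySem.Chars) form; "".join(row[a:b]) over a str
-- rebuilds the slice itself, so it is ported as the slice. pyGetD's default is only
-- reached where Python raises IndexError; those inputs are excluded by Pre_.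
def is_cross_here (t : List (List Char)) (w : List Char) : Bool :=
  let size : Int := w.length
  let posd := (PySem.List.pyRange 0 size).map
      (fun i => PySem.List.pyGetD (PySem.List.pyGetD t (size - i - 1) []) i ' ')
  let negd := (PySem.List.pyRange 0 size).map
      (fun i => PySem.List.pyGetD (PySem.List.pyGetD t i []) i ' ')
  (PySem.Chars.isIn w posd || PySem.Chars.isIn w.reverse posd) &&
  (PySem.Chars.isIn w negd || PySem.Chars.isIn w.reverse negd)

def count_cross_occurences (word : String) (table : List String) : Int :=
  let w := word.toList
  let word_length : Int := w.length
  if PySem.Int.mod word_length 2 = 0 then 0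
  else
    let t := table.map String.toList
    let height : Int := t.length
    let width : Int := (PySem.List.pyGetD t 0 []).length
    let middle_index : Int := PySem.Int.floordiv word_length 2
    let middle_char : Char := PySem.List.pyGetD w middle_index ' '
    (PySem.List.pyRange middle_index (height - middle_index)).foldl (fun count i =>
      (PySem.List.pyRange middle_index (width - middle_index)).foldl (fun count j =>
        if middle_char = PySem.List.pyGetD (PySem.List.pyGetD t i []) j ' ' then
          let row_start := max 0 (i - middle_index)
          let row_end := min height (i + middle_index + 1)
          let col_start := max 0 (j - middle_index)
          let col_end := min width (j + middle_index + 1)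
          let sub_table := (PySem.List.slice t (some row_start) (some row_end)).map
              (fun row => PySem.List.slice row (some col_start) (some col_end))
          count + (if is_cross_here sub_table w then 1 else 0)
        else count) count) 0

-- ===== PORT B =====
-- 's[p:p+L] in targets' (a 2-tuple) is the disjunction of the two equalities;
-- the Python set of centre pairs is PySem.Set (Int × Int).
def count_cross_occurences_alt (word : String) (table : List String) : Int :=
  let w := word.toList
  let L : Int := w.length
  if PySem.Int.mod L 2 = 0 then 0
  else
    let t := table.map String.toList
    let H : Int := t.length
    let W : Int := (PySem.List.pyGetD t 0 []).length
    let m : Int := PySem.Int.floordiv L 2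
    let rev := w.reverse
    let centers : PySem.Set (Int × Int) :=
      (PySem.List.pyRange (-(W - 1)) H).foldl (fun cs c =>
        let lo := max 0 c
        let hi := min H (W + c)
        let s := (PySem.List.pyRange lo hi).map
            (fun i => PySem.List.pyGetD (PySem.List.pyGetD t i []) (i - c) ' ')
        (PySem.List.pyRange 0 (hi - lo - L + 1)).foldl (fun cs p =>
          if PySem.List.slice s (some p) (some (p + L)) = w ∨
             PySem.List.slice s (some p) (some (p + L)) = rev then
            PySem.Set.add cs (lo + p + m, lo + p + m - c)
          else cs) cs) PySem.Set.empty
    (PySem.List.pyRange 0 (H + W - 1)).foldl (fun count c =>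
      let lo := max 0 (c - W + 1)
      let hi := min H (c + 1)
      let s := (PySem.List.pyRange lo hi).map
          (fun i => PySem.List.pyGetD (PySem.List.pyGetD t i []) (c - i) ' ')
      (PySem.List.pyRange 0 (hi - lo - L + 1)).foldl (fun count p =>
        if (PySem.List.slice s (some p) (some (p + L)) = w ∨
            PySem.List.slice s (some p) (some (p + L)) = rev) ∧
           (lo + p + m, c - lo - p - m) ∈ centers then
          count + 1
        else count) count) 0

-- ===== PRECONDITION & SPEC =====
-- Pre_ excludes inputs where Python raises IndexError (odd-length word with an empty table:
-- table[0]) and tables with a row shorter than the first row, on which either program may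
-- index past the short row; on some such tables A happens to return while B raises.
def Pre_count_cross_occurences (word : String) (table : List String) : Prop :=
  word.toList.length % 2 = 0 ∨
    (table ≠ [] ∧ ∀ r ∈ table, (table.headD "").toList.length ≤ r.toList.length)
instance (word : String) (table : List String) : Decidable (Pre_count_cross_occurences word table) := by
  unfold Pre_count_cross_occurences; infer_instance

def pvWitness_count_cross_occurences : String × List String :=
  ("MAS", ["M.S", ".A.", "M.S"])

def Spec_count_cross_occurences (word : String) (table : List String) (out : Int) : Prop := out = count_cross_occurences_alt word table
instance (word : String) (table : List String) (out : Int) : Decidable (Spec_count_cross_occurences word table out) := by unfold Spec_count_cross_occurences; infer_instance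

-- ===== CLAIM (what is proved, stated in full; the proofs are below) =====
def Claim_equal_count_cross_occurences : Prop := ∀ (word : String) (table : List String), Dom_count_cross_occurences word table → Pre_count_cross_occurences word table → Spec_count_cross_occurences word table (count_cross_occurences word table)

-- ===== LEMMAS AND PROOFS =====

-- proof-side intermediate: the per-centre direct-diagonal count; A is reduced to it
-- (sub-table diagonals = direct reads), and B's diagonal scan is reduced to it too.
def pvCrossAux (word : String) (table : List String) : Int :=
  let w := word.toList
  let length : Int := w.length
  if PySem.Int.mod length 2 = 0 then 0
  else
    let t := table.map String.toList
    let height : Int := t.length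
    let width : Int := (PySem.List.pyGetD t 0 []).length
    let m : Int := PySem.Int.floordiv length 2
    let rev := w.reverse
    (PySem.List.pyRange m (height - m)).foldl (fun count i =>
      (PySem.List.pyRange m (width - m)).foldl (fun count j =>
        let neg := (PySem.List.pyRange 0 length).map
            (fun k => PySem.List.pyGetD (PySem.List.pyGetD t (i - m + k) []) (j - m + k) ' ')
        let pos := (PySem.List.pyRange 0 length).map
            (fun k => PySem.List.pyGetD (PySem.List.pyGetD t (i + m - k) []) (j - m + k) ' ')
        count + (if (neg = w ∨ neg = rev) ∧ (pos = w ∨ pos = rev) then 1 else 0)) count) 0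

-- (l.drop a).take b indexed inside bounds reads l at a+K
theorem pv_take_drop_getD (l : List Char) (a b K : Nat) (h1 : K < b) (h2 : a + K < l.length) :
    (List.take b (List.drop a l)).getD K ' ' = l.getD (a+K) ' ' := by
  rw [List.getD_eq_getElem _ _ (by simp; omega), List.getD_eq_getElem _ _ h2]
  simp [List.getElem_take, List.getElem_drop]

-- per-centre agreement of A's sub-table body with the direct-diagonal body
theorem pv_cell (t : List (List Char)) (w : List Char) (m W : Nat)
    (hw : w.length = 2*m+1)
    (hW : ∀ r ∈ t, W ≤ r.length)
    (i j : Nat) (hi1 : m ≤ i) (hi2 : i + m + 1 ≤ t.length) (hj1 : m ≤ j) (hj2 : j + m + 1 ≤ W)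
    (acc : Int) :
    (if PySem.List.pyGetD w (m:Int) ' ' = PySem.List.pyGetD (PySem.List.pyGetD t (i:Int) []) (j:Int) ' ' then
       acc + (if is_cross_here
           ((PySem.List.slice t (some (max 0 ((i:Int) - m))) (some (min (t.length:Int) ((i:Int) + m + 1)))).map
             (fun row => PySem.List.slice row (some (max 0 ((j:Int) - m))) (some (min (W:Int) ((j:Int) + m + 1)))))
           w then 1 else 0)
     else acc)
    = acc + (if ((((PySem.List.pyRange 0 (w.length:Int)).map (fun k => PySem.List.pyGetD (PySem.List.pyGetD t ((i:Int) - m + k) []) ((j:Int) - m + k) ' ')) = w ∨ ((PySem.List.pyRange 0 (w.length:Int)).map (fun k => PySem.List.pyGetD (PySem.List.pyGetD t ((i:Int) - m + k) []) ((j:Int) - m + k) ' ')) = w.reverse) ∧ (((PySem.List.pyRange 0 (w.length:Int)).map (fun k => PySem.List.pyGetD (PySem.List.pyGetD t ((i:Int) + m - k) []) ((j:Int) - m + k) ' ')) = w ∨ ((PySem.List.pyRange 0 (w.length:Int)).map (fun k => PySem.List.pyGetD (PySem.List.pyGetD t ((i:Int) + m - k) []) ((j:Int) - m + k) ' ')) =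 w.reverse))
        then 1 else 0) := by
  have hrowlen : ∀ r, r < t.length → W ≤ (t.getD r []).length := by
    intro r hr
    rw [List.getD_eq_getElem _ _ hr]
    exact hW _ (List.getElem_mem hr)
  have e1 : max 0 ((i:Int) - m) = ((i - m : Nat) : Int) := by omega
  have e2 : min (t.length:Int) ((i:Int) + m + 1) = ((i + m + 1 : Nat) : Int) := by omega
  have e3 : max 0 ((j:Int) - m) = ((j - m : Nat) : Int) := by omega
  have e4 : min (W:Int) ((j:Int) + m + 1) = ((j + m + 1 : Nat) : Int) := by omega
  rw [e1, e2, e3, e4]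
  simp only [PySem.List.slice_natCast]
  have e5 : (i + m + 1) - (i - m) = 2*m+1 := by omega
  have e6 : (j + m + 1) - (j - m) = 2*m+1 := by omega
  rw [e5, e6]
  set sub := (List.take (2*m+1) (List.drop (i-m) t)).map
      (fun row => List.take (2*m+1) (List.drop (j-m) row)) with hsubdef
  have hsublen : sub.length = 2*m+1 := by
    simp [hsubdef]; omega
  have hsub_getD : ∀ K, K < 2*m+1 →
      sub.getD K [] = List.take (2*m+1) (List.drop (j-m) (t.getD (i-m+K) [])) := by
    intro K hK
    rw [List.getD_eq_getElem _ _ (by omega : K < sub.length),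
        List.getD_eq_getElem _ _ (by omega : i-m+K < t.length)]
    simp [hsubdef, List.getElem_take, List.getElem_drop]
  have hentry : ∀ (r K : Nat), r < 2*m+1 → K < 2*m+1 →
      PySem.List.pyGetD (PySem.List.pyGetD sub (r:Int) []) (K:Int) ' '
        = (t.getD (i-m+r) []).getD ((j-m)+K) ' ' := by
    intro r K hr hK
    simp only [PySem.List.pyGetD_natCast]
    rw [hsub_getD r hr]
    exact pv_take_drop_getD _ _ _ _ hK (by have := hrowlen (i-m+r) (by omega); omega)
  -- the diagonals of A's sub-table are the direct reads
  have hneg : (PySem.List.pyRange 0 (w.length:Int)).map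
        (fun k => PySem.List.pyGetD (PySem.List.pyGetD sub k []) k ' ')
      = (PySem.List.pyRange 0 (w.length:Int)).map
        (fun k => PySem.List.pyGetD (PySem.List.pyGetD t ((i:Int) - m + k) []) ((j:Int) - m + k) ' ') := by
    apply List.map_congr_left
    intro k hk
    rw [PySem.List.mem_pyRange_one] at hk
    have hkK : k = ((k.toNat : Nat) : Int) := by omega
    have hKlt : k.toNat < 2*m+1 := by omega
    rw [hkK, hentry _ _ hKlt hKlt]
    have e7 : ((i:Int) - m + k.toNat) = ((i - m + k.toNat : Nat) : Int) := by omega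
    have e8 : ((j:Int) - m + k.toNat) = (((j - m) + k.toNat : Nat) : Int) := by omega
    rw [e7, e8]
    simp only [PySem.List.pyGetD_natCast]
  have hpos : (PySem.List.pyRange 0 (w.length:Int)).map
        (fun k => PySem.List.pyGetD (PySem.List.pyGetD sub ((w.length:Int) - k - 1) []) k ' ')
      = (PySem.List.pyRange 0 (w.length:Int)).map
        (fun k => PySem.List.pyGetD (PySem.List.pyGetD t ((i:Int) + m - k) []) ((j:Int) - m + k) ' ') := by
    apply List.map_congr_left
    intro k hk
    rw [PySem.List.mem_pyRange_one] at hk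
    have hkK : k = ((k.toNat : Nat) : Int) := by omega
    have hKlt : k.toNat < 2*m+1 := by omega
    rw [hkK]
    have e9 : ((w.length:Int) - (k.toNat:Int) - 1) = ((2*m - k.toNat : Nat) : Int) := by omega
    rw [e9, hentry _ _ (by omega) hKlt]
    have e10 : i - m + (2*m - k.toNat) = i + m - k.toNat := by omega
    have e7 : ((i:Int) + m - k.toNat) = ((i + m - k.toNat : Nat) : Int) := by omega
    have e8 : ((j:Int) - m + k.toNat) = (((j - m) + k.toNat : Nat) : Int) := by omega
    rw [e10, e7, e8]
    simp only [PySem.List.pyGetD_natCast]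
  have hrangelen : (PySem.List.pyRange 0 (w.length:Int)).length = w.length := by
    rw [PySem.List.pyRange_zero_natCast]; simp
  set N := (PySem.List.pyRange 0 (w.length:Int)).map
      (fun k => PySem.List.pyGetD (PySem.List.pyGetD t ((i:Int) - m + k) []) ((j:Int) - m + k) ' ') with hNdef
  set P := (PySem.List.pyRange 0 (w.length:Int)).map
      (fun k => PySem.List.pyGetD (PySem.List.pyGetD t ((i:Int) + m - k) []) ((j:Int) - m + k) ' ') with hPdef
  have hNlen : N.length = w.length := by rw [hNdef, List.length_map, hrangelen]
  have hPlen : P.length = w.length := by rw [hPdef, List.length_map, hrangelen]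
  have hIsIn : ∀ l : List Char, l.length = w.length →
      ((PySem.Chars.isIn w l || PySem.Chars.isIn w.reverse l) = true ↔ (l = w ∨ l = w.reverse)) := by
    intro l hl
    have h1 : PySem.Chars.isIn w l = true ↔ l = w := by
      rw [PySem.Chars.isIn_iff_infix]
      exact ⟨fun h => (h.eq_of_length hl.symm).symm, fun h => h ▸ List.infix_rfl⟩
    have h2 : PySem.Chars.isIn w.reverse l = true ↔ l = w.reverse := by
      rw [PySem.Chars.isIn_iff_infix]
      exact ⟨fun h => (h.eq_of_length (by simp [hl])).symm, fun h => h ▸ List.infix_rfl⟩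
    simp [Bool.or_eq_true, h1, h2]
  have hmidw : PySem.List.pyGetD w (m:Int) ' ' = w.getD m ' ' := PySem.List.pyGetD_natCast _ _ _
  have hmid : N = w ∨ N = w.reverse →
      PySem.List.pyGetD (PySem.List.pyGetD t (i:Int) []) (j:Int) ' ' = PySem.List.pyGetD w (m:Int) ' ' := by
    intro h
    have hNm : N.getD m ' ' = PySem.List.pyGetD (PySem.List.pyGetD t (i:Int) []) (j:Int) ' ' := by
      rw [hNdef]
      simp only [PySem.List.pyRange_zero_natCast, List.map_map]
      rw [List.getD_eq_getElem _ _ (by simp; omega)]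
      rw [List.getElem_map, List.getElem_range]
      simp only [Function.comp_apply]
      have e11 : ((i:Int) - m + m) = (i:Int) := by omega
      have e12 : ((j:Int) - m + m) = (j:Int) := by omega
      rw [e11, e12]
    rw [hmidw]
    cases h with
    | inl h => rw [← hNm, h]
    | inr h =>
      rw [← hNm, h]
      rw [List.getD_eq_getElem _ _ (by simp; omega), List.getD_eq_getElem _ _ (by omega)]
      rw [List.getElem_reverse]
      congr 1
      omega
  simp only [is_cross_here]
  simp only [hneg, hpos]
  by_cases hc : PySem.List.pyGetD w (m:Int) ' ' = PySem.List.pyGetD (PySem.List.pyGetD t (i:Int) []) (j:Int) ' '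
  · rw [if_pos hc]
    congr 1
    by_cases hcond : (N = w ∨ N = w.reverse) ∧ (P = w ∨ P = w.reverse)
    · rw [if_pos hcond, if_pos]
      simp only [Bool.and_eq_true, hIsIn _ hPlen, hIsIn _ hNlen]
      exact ⟨hcond.2, hcond.1⟩
    · rw [if_neg hcond, if_neg]
      simp only [Bool.and_eq_true, hIsIn _ hPlen, hIsIn _ hNlen]
      tauto
  · rw [if_neg hc, if_neg]
    · simp
    · intro hcond
      exact hc (hmid hcond.1).symm

theorem pv_A_eq_aux
    (word : String) (table : List String)
    (hpre : Pre_count_cross_occurences word table) :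
    count_cross_occurences word table = pvCrossAux word table := by
  simp only [count_cross_occurences, pvCrossAux]
  have hm2 : PySem.Int.mod ((word.toList.length : Int)) 2 = ((word.toList.length % 2 : Nat) : Int) := by
    exact_mod_cast PySem.Int.mod_natCast word.toList.length 2
  by_cases hpar : word.toList.length % 2 = 0
  · rw [hm2, if_pos (by exact_mod_cast hpar), if_pos (by exact_mod_cast hpar)]
  · obtain ⟨ht0, hWrows⟩ := hpre.resolve_left hpar
    have hne : ¬ (((word.toList.length % 2 : Nat) : Int) = 0) := by exact_mod_cast hpar
    rw [hm2, if_neg hne, if_neg hne]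
    set w := word.toList with hwdef
    set m := w.length / 2 with hmdef
    have hw : w.length = 2*m+1 := by omega
    have hfl : PySem.Int.floordiv (w.length : Int) 2 = (m:Int) := by
      rw [PySem.Int.floordiv_eq_ediv_of_pos (by norm_num)]; omega
    rw [hfl]
    set t := table.map String.toList with htdef
    have h0 : PySem.List.pyGetD t 0 [] = (table.headD "").toList := by
      cases table with
      | nil => exact absurd rfl ht0
      | cons a as =>
        show PySem.List.pyGetD (a.toList :: as.map String.toList) ((0:Nat):Int) [] = _
        rw [PySem.List.pyGetD_natCast]
        rfl
    rw [h0]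
    set W := (table.headD "").toList.length with hWdef
    have hWt : ∀ r ∈ t, W ≤ r.length := by
      intro r hr
      rw [htdef] at hr
      obtain ⟨s, hs, rfl⟩ := List.mem_map.mp hr
      exact hWrows s hs
    apply PySem.List.foldl_congr_mem
    intro acc i hi
    apply PySem.List.foldl_congr_mem
    intro acc2 j hj
    rw [PySem.List.mem_pyRange_one] at hi hj
    have hI : i = ((i.toNat : Nat) : Int) := by omega
    have hJ : j = ((j.toNat : Nat) : Int) := by omega
    rw [hI, hJ]
    exact pv_cell t w m W hw hWt i.toNat j.toNat (by omega) (by omega) (by omega) (by omega) acc2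

-- ---- generic counting / fold-shape lemmas for the diagonal scan ----

-- a window slice of a diagonal string is the corresponding stretch of direct reads
theorem pv_slice_window (f : Int → Char) (lo hi p : Int) (L : Nat)
    (h0 : 0 ≤ p) (h1 : p + L ≤ hi - lo) :
    PySem.List.slice ((PySem.List.pyRange lo hi).map f) (some p) (some (p + (L:Int)))
      = (PySem.List.pyRange 0 (L:Int)).map (fun k => f (lo + p + k)) := by
  rw [PySem.List.slice_toNat _ h0 (by omega)]
  apply List.ext_getElem
  · simp [PySem.List.length_pyRange_one]
    omega
  · intro k hk1 hk2
    simp only [List.getElem_take, List.getElem_drop, List.getElem_map]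
    rw [PySem.List.getElem_pyRange_one, PySem.List.getElem_pyRange_one]
    congr 1
    simp only [List.length_take, List.length_drop, List.length_map,
      PySem.List.length_pyRange_one] at hk1
    omega

-- reversing a map over range(0, L) re-indexes it by L-1-k
theorem pv_rev_map_range (g : Int → Char) (L : Nat) :
    ((PySem.List.pyRange 0 (L:Int)).map g).reverse
      = (PySem.List.pyRange 0 (L:Int)).map (fun k => g ((L:Int) - 1 - k)) := by
  apply List.ext_getElem
  · simp
  · intro k hk1 hk2
    have hlen : ((PySem.List.pyRange 0 (L:Int)).map g).length = L := by
      simp [PySem.List.length_pyRange_one]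
    rw [List.getElem_reverse]
    simp only [List.getElem_map]
    rw [PySem.List.getElem_pyRange_one, PySem.List.getElem_pyRange_one]
    congr 1
    simp only [List.length_reverse, hlen] at hk1
    simp only [hlen]
    omega

-- membership after a fold whose step's membership is characterised
theorem pv_mem_foldl_body {β α : Type} (l : List β) (g : List α → β → List α)
    (Q : β → α → Prop) (hg : ∀ s b y, y ∈ g s b ↔ y ∈ s ∨ Q b y) :
    ∀ (s : List α) (y : α), y ∈ l.foldl g s ↔ y ∈ s ∨ ∃ b ∈ l, Q b y := by
  induction l with
  | nil => simp
  | cons b l ih =>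
    intro s y
    simp only [List.foldl_cons, ih, hg, List.mem_cons]
    constructor
    · rintro (⟨h | h⟩ | ⟨b', hb', h⟩)
      · exact Or.inl h
      · exact Or.inr ⟨b, Or.inl rfl, h⟩
      · exact Or.inr ⟨b', Or.inr hb', h⟩
    · rintro (h | ⟨b', (rfl | hb'), h⟩)
      · exact Or.inl (Or.inl h)
      · exact Or.inl (Or.inr h)
      · exact Or.inr ⟨b', hb', h⟩

-- membership after a conditional set-building loop
theorem pv_mem_foldl_add_if {α β : Type} [BEq α] [LawfulBEq α]
    (l : List β) (P : β → Prop) [DecidablePred P] (f : β → α) :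
    ∀ (s : PySem.Set α) (y : α),
      y ∈ l.foldl (fun s b => if P b then PySem.Set.add s (f b) else s) s ↔
        y ∈ s ∨ ∃ b ∈ l, P b ∧ y = f b := by
  induction l with
  | nil => simp
  | cons b l ih =>
    intro s y
    simp only [List.foldl_cons, List.mem_cons]
    by_cases hb : P b
    · rw [if_pos hb, ih]
      simp only [PySem.Set.mem_add]
      constructor
      · rintro (⟨h | h⟩ | ⟨b', hb', h⟩)
        · exact Or.inl h
        · exact Or.inr ⟨b, Or.inl rfl, hb, h⟩
        · exact Or.inr ⟨b', Or.inr hb', h⟩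
      · rintro (h | ⟨b', (rfl | hb'), hP, h⟩)
        · exact Or.inl (Or.inl h)
        · exact Or.inl (Or.inr h)
        · exact Or.inr ⟨b', hb', hP, h⟩
    · rw [if_neg hb, ih]
      constructor
      · rintro (h | ⟨b', hb', h⟩)
        · exact Or.inl h
        · exact Or.inr ⟨b', Or.inr hb', h⟩
      · rintro (h | ⟨b', (rfl | hb'), hP, h⟩)
        · exact Or.inl h
        · exact absurd hP hb
        · exact Or.inr ⟨b', hb', hP, h⟩

-- the (outer, inner) index pairs of a nested loop are pairwise distinct
theorem pv_nodup_pairs (l : List Int) (g : Int → List Int)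
    (hl : l.Nodup) (hg : ∀ c, (g c).Nodup) :
    (l.flatMap fun c => (g c).map (Prod.mk c)).Nodup := by
  induction l with
  | nil => simp
  | cons c l ih =>
    simp only [List.flatMap_cons]
    rw [List.nodup_append]
    refine ⟨List.Nodup.map_on (fun x _ y _ h => by cases h; rfl) (hg c), ih hl.of_cons, ?_⟩
    intro a ha b hb hab
    subst hab
    obtain ⟨p, hp, rfl⟩ := List.mem_map.mp ha
    obtain ⟨c', hc', hb'⟩ := List.mem_flatMap.mp hb
    obtain ⟨p', hp', he⟩ := List.mem_map.mp hb'
    injection he with h1 h2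
    subst h1
    exact (List.nodup_cons.mp hl).1 hc'

-- two Nodup lists counted under predicates matched by a bijection have equal counts
theorem pv_countP_bij {α β : Type} [DecidableEq β] (l1 : List α) (l2 : List β)
    (Q1 : α → Bool) (Q2 : β → Bool) (φ : α → β)
    (h1 : l1.Nodup) (h2 : l2.Nodup)
    (hinj : ∀ x ∈ l1, ∀ x' ∈ l1, φ x = φ x' → x = x')
    (him : ∀ y, (y ∈ l2 ∧ Q2 y = true) ↔ ∃ x, x ∈ l1 ∧ Q1 x = true ∧ y = φ x) :
    l1.countP Q1 = l2.countP Q2 := by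
  have hMnd : ((l1.filter Q1).map φ).Nodup :=
    (h1.filter Q1).map_on (fun x hx y hy h =>
      hinj x (List.mem_of_mem_filter hx) y (List.mem_of_mem_filter hy) h)
  have hperm : ((l1.filter Q1).map φ).Perm (l2.filter Q2) := by
    rw [List.perm_ext_iff_of_nodup hMnd (h2.filter Q2)]
    intro y
    simp only [List.mem_map, List.mem_filter]
    rw [show (∃ x, (x ∈ l1 ∧ Q1 x = true) ∧ φ x = y) ↔ ∃ x, x ∈ l1 ∧ Q1 x = true ∧ y = φ x by
      constructor
      · rintro ⟨x, ⟨hx, hq⟩, rfl⟩; exact ⟨x, hx, hq, rfl⟩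
      · rintro ⟨x, hx, hq, rfl⟩; exact ⟨x, ⟨hx, hq⟩, rfl⟩]
    exact (him y).symm
  calc l1.countP Q1 = (l1.filter Q1).length := List.countP_eq_length_filter
    _ = ((l1.filter Q1).map φ).length := by simp
    _ = (l2.filter Q2).length := hperm.length_eq
    _ = l2.countP Q2 := List.countP_eq_length_filter.symm

-- a sum of casts of Nats is the cast of the sum
theorem pv_sum_natCast {β : Type} (l : List β) (n : β → Nat) :
    (l.map (fun c => ((n c : Nat) : Int))).sum = (((l.map n).sum : Nat) : Int) := by
  induction l with
  | nil => simp
  | cons c l ih => simp [ih]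

-- Prop-conditioned counting loops
theorem pv_foldl_count {β : Type} (l : List β) (P : β → Prop) [DecidablePred P] (a : Int) :
    l.foldl (fun acc x => if P x then acc + 1 else acc) a
      = a + ((l.countP (fun x => decide (P x)) : Nat) : Int) := by
  rw [← PySem.List.foldl_count_if (fun x => decide (P x))]
  apply PySem.List.foldl_congr_mem
  intro acc x _
  simp

theorem pv_foldl_count' {β : Type} (l : List β) (P : β → Prop) [DecidablePred P] (a : Int) :
    l.foldl (fun acc x => acc + (if P x then 1 else 0)) a
      = a + ((l.countP (fun x => decide (P x)) : Nat) : Int) := by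
  rw [← pv_foldl_count l P a]
  apply PySem.List.foldl_congr_mem
  intro acc x _
  split_ifs <;> omega

-- a pass-1 window (down-right diagonal) exists with centre y iff y is an in-range
-- centre whose down-right diagonal reads the word forwards or backwards
theorem pv_pass1_iff (r : Int → Int → Char) (w : List Char) (m : Nat) (H W : Int)
    (hw : w.length = 2*m+1) (y : Int × Int) :
    (∃ c ∈ PySem.List.pyRange (-(W - 1)) H,
       ∃ p ∈ PySem.List.pyRange 0 (min H (W + c) - max 0 c - (w.length:Int) + 1),
        (PySem.List.slice ((PySem.List.pyRange (max 0 c) (min H (W + c))).map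
              (fun i => r i (i - c))) (some p) (some (p + (w.length:Int))) = w ∨
         PySem.List.slice ((PySem.List.pyRange (max 0 c) (min H (W + c))).map
              (fun i => r i (i - c))) (some p) (some (p + (w.length:Int))) = w.reverse) ∧
        y = (max 0 c + p + (m:Int), max 0 c + p + (m:Int) - c))
    ↔ ((m:Int) ≤ y.1 ∧ y.1 < H - m ∧ (m:Int) ≤ y.2 ∧ y.2 < W - m ∧
       ((PySem.List.pyRange 0 (w.length:Int)).map (fun k => r (y.1 - m + k) (y.2 - m + k)) = w ∨
        (PySem.List.pyRange 0 (w.length:Int)).map (fun k => r (y.1 - m + k) (y.2 - m + k)) = w.reverse)) := by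
  have hwI : (w.length : Int) = 2*(m:Int)+1 := by exact_mod_cast hw
  constructor
  · rintro ⟨c, hc, p, hp, hcond, rfl⟩
    rw [PySem.List.mem_pyRange_one] at hc hp
    rw [pv_slice_window (fun i => r i (i - c)) (max 0 c) (min H (W + c)) p w.length hp.1
        (by omega)] at hcond
    dsimp only
    have hmap : (PySem.List.pyRange 0 (w.length:Int)).map (fun k => r (max 0 c + p + k) (max 0 c + p + k - c))
        = (PySem.List.pyRange 0 (w.length:Int)).map
            (fun k => r (max 0 c + p + (m:Int) - m + k) (max 0 c + p + (m:Int) - c - m + k)) := by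
      apply List.map_congr_left
      intro k _
      rw [show max 0 c + p + (m:Int) - m + k = max 0 c + p + k from by ring,
          show max 0 c + p + (m:Int) - c - m + k = max 0 c + p + k - c from by ring]
    rw [hmap] at hcond
    exact ⟨by omega, by omega, by omega, by omega, hcond⟩
  · rintro ⟨h1, h2, h3, h4, hcond⟩
    refine ⟨y.1 - y.2, ?_, y.1 - (m:Int) - max 0 (y.1 - y.2), ?_, ?_, ?_⟩
    · rw [PySem.List.mem_pyRange_one]; omega
    · rw [PySem.List.mem_pyRange_one]; omega
    · rw [pv_slice_window (fun i => r i (i - (y.1 - y.2))) (max 0 (y.1 - y.2)) (min H (W + (y.1 - y.2)))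
          (y.1 - (m:Int) - max 0 (y.1 - y.2)) w.length (by omega) (by omega)]
      have hmap : (PySem.List.pyRange 0 (w.length:Int)).map
            (fun k => r (max 0 (y.1 - y.2) + (y.1 - (m:Int) - max 0 (y.1 - y.2)) + k)
                        (max 0 (y.1 - y.2) + (y.1 - (m:Int) - max 0 (y.1 - y.2)) + k - (y.1 - y.2)))
          = (PySem.List.pyRange 0 (w.length:Int)).map (fun k => r (y.1 - m + k) (y.2 - m + k)) := by
        apply List.map_congr_left
        intro k _
        rw [show max 0 (y.1 - y.2) + (y.1 - (m:Int) - max 0 (y.1 - y.2)) + k = y.1 - m + k from by ring,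
            show y.1 - (m:Int) + k - (y.1 - y.2) = y.2 - m + k from by ring]
      rw [hmap]
      exact hcond
    · rw [Prod.ext_iff]
      exact ⟨by dsimp only; omega, by dsimp only; omega⟩

-- a pass-2 window (anti-diagonal, read top-down) with centre y, with any extra predicate
-- R on the centre, exists iff y is an in-range centre whose up-right diagonal reads the
-- word forwards or backwards and R holds at y
theorem pv_pass2_iff (r : Int → Int → Char) (w : List Char) (m : Nat) (H W : Int)
    (hw : w.length = 2*m+1) (R : Int × Int → Prop) (y : Int × Int) :
    (∃ x : Int × Int, x ∈ ((PySem.List.pyRange 0 (H + W - 1)).flatMap fun c =>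
          (PySem.List.pyRange 0 (min H (c + 1) - max 0 (c - W + 1) - (w.length:Int) + 1)).map (Prod.mk c)) ∧
        ((PySem.List.slice ((PySem.List.pyRange (max 0 (x.1 - W + 1)) (min H (x.1 + 1))).map
              (fun i => r i (x.1 - i))) (some x.2) (some (x.2 + (w.length:Int))) = w ∨
          PySem.List.slice ((PySem.List.pyRange (max 0 (x.1 - W + 1)) (min H (x.1 + 1))).map
              (fun i => r i (x.1 - i))) (some x.2) (some (x.2 + (w.length:Int))) = w.reverse) ∧
         R (max 0 (x.1 - W + 1) + x.2 + (m:Int), x.1 - max 0 (x.1 - W + 1) - x.2 - (m:Int))) ∧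
        y = (max 0 (x.1 - W + 1) + x.2 + (m:Int), x.1 - max 0 (x.1 - W + 1) - x.2 - (m:Int)))
    ↔ ((m:Int) ≤ y.1 ∧ y.1 < H - m ∧ (m:Int) ≤ y.2 ∧ y.2 < W - m ∧
       ((PySem.List.pyRange 0 (w.length:Int)).map (fun k => r (y.1 + m - k) (y.2 - m + k)) = w ∨
        (PySem.List.pyRange 0 (w.length:Int)).map (fun k => r (y.1 + m - k) (y.2 - m + k)) = w.reverse) ∧
       R y) := by
  have hwI : (w.length : Int) = 2*(m:Int)+1 := by exact_mod_cast hw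
  have key : ∀ c p, 0 ≤ p → p + (w.length:Int) ≤ min H (c + 1) - max 0 (c - W + 1) →
      PySem.List.slice ((PySem.List.pyRange (max 0 (c - W + 1)) (min H (c + 1))).map
          (fun i => r i (c - i))) (some p) (some (p + (w.length:Int)))
        = ((PySem.List.pyRange 0 (w.length:Int)).map
            (fun k => r (max 0 (c - W + 1) + p + (m:Int) + m - k)
                        (c - max 0 (c - W + 1) - p - (m:Int) - m + k))).reverse := by
    intro c p hp0 hpL
    rw [pv_slice_window (fun i => r i (c - i)) (max 0 (c - W + 1)) (min H (c + 1)) p w.length hp0 hpL]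
    rw [pv_rev_map_range]
    apply List.map_congr_left
    intro k hk
    rw [PySem.List.mem_pyRange_one] at hk
    rw [show max 0 (c - W + 1) + p + (m:Int) + m - ((w.length:Int) - 1 - k) = max 0 (c - W + 1) + p + k from by omega,
        show c - max 0 (c - W + 1) - p - (m:Int) - m + ((w.length:Int) - 1 - k) = c - (max 0 (c - W + 1) + p + k) from by omega]
  constructor
  · rintro ⟨x, hx, ⟨hcond, hR⟩, rfl⟩
    obtain ⟨c, hc, hxm⟩ := List.mem_flatMap.mp hx
    obtain ⟨p, hp, rfl⟩ := List.mem_map.mp hxm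
    rw [PySem.List.mem_pyRange_one] at hc hp
    dsimp only at hcond hR ⊢
    rw [key c p hp.1 (by omega)] at hcond
    rw [List.reverse_eq_iff, List.reverse_eq_iff, List.reverse_reverse] at hcond
    exact ⟨by omega, by omega, by omega, by omega, Or.symm hcond, hR⟩
  · rintro ⟨h1, h2, h3, h4, hcond, hR⟩
    refine ⟨(y.1 + y.2, y.1 - (m:Int) - max 0 (y.1 + y.2 - W + 1)), ?_, ⟨?_, ?_⟩, ?_⟩
    · apply List.mem_flatMap.mpr
      refine ⟨y.1 + y.2, ?_, List.mem_map.mpr ⟨y.1 - (m:Int) - max 0 (y.1 + y.2 - W + 1), ?_, rfl⟩⟩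
      · rw [PySem.List.mem_pyRange_one]; omega
      · rw [PySem.List.mem_pyRange_one]; omega
    · dsimp only
      rw [key (y.1 + y.2) (y.1 - (m:Int) - max 0 (y.1 + y.2 - W + 1)) (by omega) (by omega)]
      rw [List.reverse_eq_iff, List.reverse_eq_iff, List.reverse_reverse]
      have hmap : (PySem.List.pyRange 0 (w.length:Int)).map
            (fun k => r (max 0 (y.1 + y.2 - W + 1) + (y.1 - (m:Int) - max 0 (y.1 + y.2 - W + 1)) + (m:Int) + m - k)
                        (y.1 + y.2 - max 0 (y.1 + y.2 - W + 1) - (y.1 - (m:Int) - max 0 (y.1 + y.2 - W + 1)) - (m:Int) - m + k))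
          = (PySem.List.pyRange 0 (w.length:Int)).map (fun k => r (y.1 + m - k) (y.2 - m + k)) := by
        apply List.map_congr_left
        intro k _
        rw [show max 0 (y.1 + y.2 - W + 1) + (y.1 - (m:Int) - max 0 (y.1 + y.2 - W + 1)) + (m:Int) + m - k = y.1 + m - k from by ring,
            show y.1 + y.2 - max 0 (y.1 + y.2 - W + 1) - (y.1 - (m:Int) - max 0 (y.1 + y.2 - W + 1)) - (m:Int) - m + k = y.2 - m + k from by ring]
      rw [hmap]
      exact Or.symm hcond
    · dsimp only
      have e1 : max 0 (y.1 + y.2 - W + 1) + (y.1 - (m:Int) - max 0 (y.1 + y.2 - W + 1)) + (m:Int) = y.1 := by ring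
      have e2 : y.1 + y.2 - max 0 (y.1 + y.2 - W + 1) - (y.1 - (m:Int) - max 0 (y.1 + y.2 - W + 1)) - (m:Int) = y.2 := by ring
      rw [e1, e2]
      exact hR
    · dsimp only
      rw [Prod.ext_iff]
      exact ⟨by dsimp only; omega, by dsimp only; omega⟩

-- named pieces of B's zeta-reduced odd branch (abbrev: definitionally transparent)
abbrev pvRead (t : List (List Char)) (i j : Int) : Char :=
  PySem.List.pyGetD (PySem.List.pyGetD t i []) j ' '

abbrev pvNegL (t : List (List Char)) (w : List Char) (mI : Int) (y : Int × Int) : List Char :=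
  (PySem.List.pyRange 0 (w.length:Int)).map (fun k => pvRead t (y.1 - mI + k) (y.2 - mI + k))

abbrev pvPosL (t : List (List Char)) (w : List Char) (mI : Int) (y : Int × Int) : List Char :=
  (PySem.List.pyRange 0 (w.length:Int)).map (fun k => pvRead t (y.1 + mI - k) (y.2 - mI + k))

abbrev pvCond1 (t : List (List Char)) (w : List Char) (H W c p : Int) : Prop :=
  PySem.List.slice ((PySem.List.pyRange (max 0 c) (min H (W + c))).map
      (fun i => pvRead t i (i - c))) (some p) (some (p + (w.length:Int))) = w ∨
  PySem.List.slice ((PySem.List.pyRange (max 0 c) (min H (W + c))).map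
      (fun i => pvRead t i (i - c))) (some p) (some (p + (w.length:Int))) = w.reverse

abbrev pvCond2 (t : List (List Char)) (w : List Char) (H W c p : Int) : Prop :=
  PySem.List.slice ((PySem.List.pyRange (max 0 (c - W + 1)) (min H (c + 1))).map
      (fun i => pvRead t i (c - i))) (some p) (some (p + (w.length:Int))) = w ∨
  PySem.List.slice ((PySem.List.pyRange (max 0 (c - W + 1)) (min H (c + 1))).map
      (fun i => pvRead t i (c - i))) (some p) (some (p + (w.length:Int))) = w.reverse

abbrev pvCtr1 (mI c p : Int) : Int × Int := (max 0 c + p + mI, max 0 c + p + mI - c)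

abbrev pvCtr2 (W mI c p : Int) : Int × Int :=
  (max 0 (c - W + 1) + p + mI, c - max 0 (c - W + 1) - p - mI)

def pvCenters (t : List (List Char)) (w : List Char) (mI H W : Int) : PySem.Set (Int × Int) :=
  (PySem.List.pyRange (-(W - 1)) H).foldl (fun cs c =>
    (PySem.List.pyRange 0 (min H (W + c) - max 0 c - (w.length:Int) + 1)).foldl (fun cs p =>
      if pvCond1 t w H W c p then PySem.Set.add cs (pvCtr1 mI c p) else cs) cs) PySem.Set.empty

def pvPass2 (t : List (List Char)) (w : List Char) (mI H W : Int) (C : PySem.Set (Int × Int)) : Int :=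
  (PySem.List.pyRange 0 (H + W - 1)).foldl (fun count c =>
    (PySem.List.pyRange 0 (min H (c + 1) - max 0 (c - W + 1) - (w.length:Int) + 1)).foldl (fun count p =>
      if pvCond2 t w H W c p ∧ pvCtr2 W mI c p ∈ C then count + 1 else count) count) 0

def pvAuxCount (t : List (List Char)) (w : List Char) (mI H W : Int) : Int :=
  (PySem.List.pyRange mI (H - mI)).foldl (fun count i =>
    (PySem.List.pyRange mI (W - mI)).foldl (fun count j =>
      count + (if (pvNegL t w mI (i, j) = w ∨ pvNegL t w mI (i, j) = w.reverse) ∧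
                  (pvPosL t w mI (i, j) = w ∨ pvPosL t w mI (i, j) = w.reverse) then 1 else 0)) count) 0

-- a per-outer-index sum of inner counts is the count over the (outer, inner) pair list
theorem pv_sum_countP_pairs (l : List Int) (g : Int → List Int) (Q : Int × Int → Bool) :
    (l.map (fun c => (g c).countP (fun p => Q (c, p)))).sum
      = (l.flatMap fun c => (g c).map (Prod.mk c)).countP Q := by
  induction l with
  | nil => simp
  | cons c l ih =>
    simp only [List.map_cons, List.sum_cons, List.flatMap_cons, List.countP_append,
      List.countP_map, ih]
    rfl

-- membership in the rectangle pair list is the pair of range bounds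
theorem pv_mem_pairs (a b a' b' : Int) (y : Int × Int) :
    (y ∈ (PySem.List.pyRange a b).flatMap fun i => (PySem.List.pyRange a' b').map (Prod.mk i)) ↔
      (a ≤ y.1 ∧ y.1 < b ∧ a' ≤ y.2 ∧ y.2 < b') := by
  constructor
  · intro h
    obtain ⟨i, hi, hm⟩ := List.mem_flatMap.mp h
    obtain ⟨j, hj, rfl⟩ := List.mem_map.mp hm
    rw [PySem.List.mem_pyRange_one] at hi hj
    exact ⟨hi.1, hi.2, hj.1, hj.2⟩
  · rintro ⟨h1, h2, h3, h4⟩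
    exact List.mem_flatMap.mpr ⟨y.1, PySem.List.mem_pyRange_one.mpr ⟨h1, h2⟩,
      List.mem_map.mpr ⟨y.2, PySem.List.mem_pyRange_one.mpr ⟨h3, h4⟩, Prod.mk.eta⟩⟩

-- the centre set collected by pass 1 holds exactly the in-range centres whose
-- down-right diagonal reads the word forwards or backwards
theorem pv_centers_char (t : List (List Char)) (w : List Char) (m : Nat) (H W : Int)
    (hw : w.length = 2*m+1) (y : Int × Int) :
    y ∈ pvCenters t w (m:Int) H W ↔
      ((m:Int) ≤ y.1 ∧ y.1 < H - m ∧ (m:Int) ≤ y.2 ∧ y.2 < W - m ∧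
       (pvNegL t w (m:Int) y = w ∨ pvNegL t w (m:Int) y = w.reverse)) := by
  unfold pvCenters
  rw [pv_mem_foldl_body _ _
      (fun c y => ∃ p ∈ PySem.List.pyRange 0 (min H (W + c) - max 0 c - (w.length:Int) + 1),
          pvCond1 t w H W c p ∧ y = pvCtr1 (m:Int) c p)
      (fun s c y => pv_mem_foldl_add_if
        (PySem.List.pyRange 0 (min H (W + c) - max 0 c - (w.length:Int) + 1))
        (pvCond1 t w H W c) (pvCtr1 (m:Int) c) s y)
      PySem.Set.empty y]
  have hemp : (y ∈ (PySem.Set.empty : PySem.Set (Int × Int))) ↔ False := by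
    simp [PySem.Set.empty]
  rw [hemp, false_or]
  exact pv_pass1_iff (fun i j => pvRead t i j) w m H W hw y

-- B's diagonal scan equals the per-centre count
theorem pv_scan_eq_centre (t : List (List Char)) (w : List Char) (m : Nat) (H W : Int)
    (hw : w.length = 2*m+1) :
    pvPass2 t w (m:Int) H W (pvCenters t w (m:Int) H W) = pvAuxCount t w (m:Int) H W := by
  set QQ1 : Int × Int → Bool := fun x =>
    decide (pvCond2 t w H W x.1 x.2 ∧ pvCtr2 W (m:Int) x.1 x.2 ∈ pvCenters t w (m:Int) H W) with hQQ1
  set QQ2 : Int × Int → Bool := fun x =>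
    decide ((pvNegL t w (m:Int) x = w ∨ pvNegL t w (m:Int) x = w.reverse) ∧
            (pvPosL t w (m:Int) x = w ∨ pvPosL t w (m:Int) x = w.reverse)) with hQQ2
  have step1 : pvPass2 t w (m:Int) H W (pvCenters t w (m:Int) H W)
      = ((((PySem.List.pyRange 0 (H + W - 1)).flatMap fun c =>
          (PySem.List.pyRange 0 (min H (c + 1) - max 0 (c - W + 1) - (w.length:Int) + 1)).map
            (Prod.mk c)).countP QQ1 : Nat) : Int) := by
    unfold pvPass2
    rw [PySem.List.foldl_congr_mem _ _
        (fun (count : Int) c => count +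
          (((PySem.List.pyRange 0 (min H (c + 1) - max 0 (c - W + 1) - (w.length:Int) + 1)).countP
            (fun p => QQ1 (c, p)) : Nat) : Int)) 0
        (fun acc c _ => by rw [pv_foldl_count]),
      PySem.List.foldl_add, pv_sum_natCast, pv_sum_countP_pairs]
    omega
  have step2 : pvAuxCount t w (m:Int) H W
      = ((((PySem.List.pyRange (m:Int) (H - (m:Int))).flatMap fun i =>
          (PySem.List.pyRange (m:Int) (W - (m:Int))).map (Prod.mk i)).countP QQ2 : Nat) : Int) := by
    unfold pvAuxCount
    rw [PySem.List.foldl_congr_mem _ _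
        (fun (count : Int) i => count +
          (((PySem.List.pyRange (m:Int) (W - (m:Int))).countP
            (fun j => QQ2 (i, j)) : Nat) : Int)) 0
        (fun acc i _ => by rw [pv_foldl_count']),
      PySem.List.foldl_add, pv_sum_natCast, pv_sum_countP_pairs]
    omega
  rw [step1, step2]
  congr 1
  apply pv_countP_bij _ _ QQ1 QQ2 (fun x => pvCtr2 W (m:Int) x.1 x.2)
  · exact pv_nodup_pairs _ _ (PySem.List.nodup_pyRange_one _ _) (fun c => PySem.List.nodup_pyRange_one _ _)
  · exact pv_nodup_pairs _ _ (PySem.List.nodup_pyRange_one _ _) (fun i => PySem.List.nodup_pyRange_one _ _)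
  · rintro ⟨c, p⟩ _ ⟨c', p'⟩ _ h
    rw [Prod.ext_iff] at h
    obtain ⟨h1, h2⟩ := h
    dsimp only at h1 h2
    have hcc : c = c' := by omega
    subst hcc
    have hpp : p = p' := by omega
    subst hpp
    rfl
  · intro y
    have hR := pv_pass2_iff (fun i j => pvRead t i j) w m H W hw
        (fun z => z ∈ pvCenters t w (m:Int) H W) y
    rw [pv_mem_pairs]
    constructor
    · rintro ⟨⟨hb1, hb2, hb3, hb4⟩, hq⟩
      rw [hQQ2, decide_eq_true_eq] at hq
      obtain ⟨x, hx, ⟨hcnd, hRx⟩, hyx⟩ :=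
        hR.mpr ⟨hb1, hb2, hb3, hb4, hq.2,
          (pv_centers_char t w m H W hw y).mpr ⟨hb1, hb2, hb3, hb4, hq.1⟩⟩
      refine ⟨x, hx, ?_, hyx⟩
      rw [hQQ1, decide_eq_true_eq]
      exact ⟨hcnd, hRx⟩
    · rintro ⟨x, hx, hq, hyx⟩
      rw [hQQ1, decide_eq_true_eq] at hq
      obtain ⟨hb1, hb2, hb3, hb4, hpos, hRy⟩ := hR.mp ⟨x, hx, ⟨hq.1, hq.2⟩, hyx⟩
      have hneg := ((pv_centers_char t w m H W hw y).mp hRy).2.2.2.2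
      refine ⟨⟨hb1, hb2, hb3, hb4⟩, ?_⟩
      rw [hQQ2, decide_eq_true_eq]
      exact ⟨hneg, hpos⟩

theorem pv_alt_eq_aux (word : String) (table : List String) :
    count_cross_occurences_alt word table = pvCrossAux word table := by
  simp only [count_cross_occurences_alt, pvCrossAux]
  have hm2 : PySem.Int.mod ((word.toList.length : Int)) 2 = ((word.toList.length % 2 : Nat) : Int) := by
    exact_mod_cast PySem.Int.mod_natCast word.toList.length 2
  by_cases hpar : word.toList.length % 2 = 0
  · rw [hm2, if_pos (by exact_mod_cast hpar), if_pos (by exact_mod_cast hpar)]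
  · have hne : ¬ (((word.toList.length % 2 : Nat) : Int) = 0) := by exact_mod_cast hpar
    rw [hm2, if_neg hne, if_neg hne]
    set w := word.toList with hwdef
    set m := w.length / 2 with hmdef
    have hw : w.length = 2*m+1 := by omega
    have hfl : PySem.Int.floordiv (w.length : Int) 2 = (m:Int) := by
      rw [PySem.Int.floordiv_eq_ediv_of_pos (by norm_num)]; omega
    rw [hfl]
    set t := table.map String.toList with htdef
    exact pv_scan_eq_centre t w m ((t.length : Nat) : Int)
      (((PySem.List.pyGetD t 0 []).length : Nat) : Int) hw

-- ===== VERDICT (by name: the statement is the Claim_ definition above) =====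
theorem count_cross_occurences_spec : Claim_equal_count_cross_occurences := by
  intro word table _ hpre
  unfold Spec_count_cross_occurences
  rw [pv_A_eq_aux word table hpre, pv_alt_eq_aux word table]
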